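-- pv_equiv track=rewrite | github.com/wyk18703232953/myResearch | codeComplex/data copy/filteredData/python/nlogn/python_nlogn_0703.py | find
-- ===== SOURCE A (Python) =====
-- def find(A):
--     from collections import defaultdict
--     A = sorted(A)
--     N = len(A)
--     dic = defaultdict(int)
--     for i in range(N):
--         dic[A[i]] += 1
--
--     count = set()
--     for x in A:
--         if dic[x] > 2:
--             return "cslnb"
--         if dic[x] == 2:
--             count.add(x)
--             y = x - 1
--             if y in dic:
--                 return "cslnb"
--     if len(count) > 1:
--         return "cslnb"
--
--     if 0 in count:
--         return "cslnb"
--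
--     temp = 0
--     for i in range(N):
--         temp += A[i] - i
--     if temp % 2 == 1:
--         return "sjfnb"
--     return "cslnb"
-- ===== SOURCE B (Python) =====
-- def find(A):
--     B = sorted(A)
--     pairs = 0
--     prev2 = None
--     prev = None
--     for x in B:
--         if prev is not None and x == prev:
--             pairs += 1
--             if x == 0 or (prev2 is not None and prev2 >= x - 1):
--                 return "cslnb"
--         prev2, prev = prev, x
--     if pairs > 1:
--         return "cslnb"
--     n = len(B)
--     return "sjfnb" if (sum(B) - n * (n - 1) // 2) % 2 == 1 else "cslnb"
-- ===== Notes on version B (the rewrite author's own statement) =====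
-- stated objective: faster
-- what changed: B replaces A's dict-of-counts and duplicate-set bookkeeping by a single window scan of the sorted list that compares each element with its two predecessors (adjacent pair found, pair of 0, triple or predecessor present detected as prev2 >= x-1), and computes A's positional parity sum by the closed form sum(A) - n(n-1)/2.
import Mathlib
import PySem

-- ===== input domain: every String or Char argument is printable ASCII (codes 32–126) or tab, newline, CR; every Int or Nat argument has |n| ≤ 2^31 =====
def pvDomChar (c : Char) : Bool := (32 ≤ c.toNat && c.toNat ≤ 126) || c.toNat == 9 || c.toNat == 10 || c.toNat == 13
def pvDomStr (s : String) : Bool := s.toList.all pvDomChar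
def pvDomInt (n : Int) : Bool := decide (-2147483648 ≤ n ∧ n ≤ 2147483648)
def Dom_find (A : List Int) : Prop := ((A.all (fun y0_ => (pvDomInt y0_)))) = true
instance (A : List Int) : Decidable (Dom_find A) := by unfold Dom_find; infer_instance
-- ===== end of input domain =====

-- B replaces A's dict/set bookkeeping by a single window scan of the sorted list
-- (each element compared with its two predecessors) and a closed-form parity sum
-- (objective: faster; a timing run measured B ≥ 1.5× faster on large inputs).

-- ===== PORT A =====
-- helper: the 'for x in A: ...' loop with its two early returns (none = early "cslnb" return)
def findLoopA (dic : PySem.Dict Int Int) : List Int → PySem.Set Int → Option (PySem.Set Int)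
  | [], count => some count
  | x :: xs, count =>
    if dic.getD x 0 > 2 then none
    else if dic.getD x 0 == 2 then
      let count' := PySem.Set.add count x
      if dic.contains (x - 1) then none
      else findLoopA dic xs count'
    else findLoopA dic xs count

def find (A : List Int) : String :=
  let As := PySem.List.sorted A (fun x => x) false
  let N : Int := As.length
  let dic := (PySem.List.pyRange 0 N 1).foldl
      (fun d i => d.modify (PySem.List.pyGetD As i 0) 0 (· + 1)) PySem.Dict.empty
  match findLoopA dic As PySem.Set.empty with
  | none => "cslnb"
  | some count =>
    if PySem.Set.len count > 1 then "cslnb"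
    else if PySem.Set.contains count 0 then "cslnb"
    else
      let temp := (PySem.List.pyRange 0 N 1).foldl
        (fun t i => t + (PySem.List.pyGetD As i 0 - i)) 0
      if PySem.Int.mod temp 2 == 1 then "sjfnb" else "cslnb"

-- ===== PORT B =====
-- the 'for x in B: ...' window loop; state = (prev2, prev, pairs); none = early "cslnb" return
def findLoopB : List Int → Option Int → Option Int → Int → Option Int
  | [], _, _, pairs => some pairs
  | x :: xs, prev2, prev, pairs =>
    -- 'if prev is not None and x == prev:' (short-circuit) as a match on prev
    match prev with
    | some p =>
      if x == p then
        -- pairs += 1, then the early-return test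
        if x == 0 || (match prev2 with | some q => decide (q ≥ x - 1) | none => false) then none
        else findLoopB xs prev (some x) (pairs + 1)
      else findLoopB xs prev (some x) pairs
    | none => findLoopB xs prev (some x) pairs

def find_alt (A : List Int) : String :=
  let Bs := PySem.List.sorted A (fun x => x) false
  match findLoopB Bs none none 0 with
  | none => "cslnb"
  | some pairs =>
    if pairs > 1 then "cslnb"
    else
      let n : Int := Bs.length
      if PySem.Int.mod (Bs.sum - PySem.Int.floordiv (n * (n - 1)) 2) 2 == 1 then "sjfnb"
      else "cslnb"

-- ===== PRECONDITION & SPEC =====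
def Spec_find (A : List Int) (out : String) : Prop := out = find_alt A
instance (A : List Int) (out : String) : Decidable (Spec_find A out) := by unfold Spec_find; infer_instance

-- ===== CLAIM (what is proved, stated in full; the proofs are below) =====
def Claim_equal_find : Prop := ∀ (A : List Int), Dom_find A → Spec_find A (find A)

-- ===== LEMMAS AND PROOFS =====

-- characterization of A's loop (unchanged scan, early return as a global 'any')
theorem loopA_eq (dic : PySem.Dict Int Int) (l : List Int) (count : PySem.Set Int) :
    findLoopA dic l count =
      if l.any (fun x => decide (2 < dic.getD x 0) || (dic.getD x 0 == 2 && dic.contains (x - 1)))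
      then none
      else some ((l.filter (fun x => dic.getD x 0 == 2)).foldl PySem.Set.add count) := by
  induction l generalizing count with
  | nil => simp [findLoopA]
  | cons x xs ih =>
    simp only [findLoopA, List.any_cons, List.filter_cons]
    by_cases h1 : 2 < dic.getD x 0
    · simp [h1]
    · by_cases h2 : dic.getD x 0 = 2
      · by_cases h3 : dic.contains (x - 1)
        · simp [h2, h3]
        · simp [h2, h3, ih]
      · simp [h1, h2, ih]

-- B's window loop, split into a pure 'bad pair somewhere' test and a pair counter
def pairBad (p2 p : Option Int) (x : Int) : Bool :=
  (match p with | some b => x == b | none => false) &&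
  (x == 0 || (match p2 with | some q => decide (q ≥ x - 1) | none => false))

def badScan : List Int → Option Int → Option Int → Bool
  | [], _, _ => false
  | x :: xs, p2, p => pairBad p2 p x || badScan xs p (some x)

def cntAdj : List Int → Option Int → Int
  | [], _ => 0
  | x :: xs, p => (if p = some x then 1 else 0) + cntAdj xs (some x)

theorem loopB_eq (l : List Int) : ∀ (p2 p : Option Int) (c : Int),
    findLoopB l p2 p c = if badScan l p2 p then none else some (c + cntAdj l p) := by
  induction l with
  | nil => intro p2 p c; simp [findLoopB, badScan, cntAdj]
  | cons x xs ih =>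
    intro p2 p c
    rw [show badScan (x :: xs) p2 p = (pairBad p2 p x || badScan xs p (some x)) from rfl,
      show cntAdj (x :: xs) p = ((if p = some x then 1 else 0) + cntAdj xs (some x)) from rfl]
    cases p with
    | none =>
      rw [show findLoopB (x :: xs) p2 none c = findLoopB xs none (some x) c from rfl, ih,
        show pairBad p2 none x = false from rfl, Bool.false_or,
        if_neg (show ¬(none : Option Int) = some x from by simp), zero_add]
    | some v =>
      rw [show findLoopB (x :: xs) p2 (some v) c
          = (if (x == v) = true then
               (if (x == 0 || (match p2 with | some q => decide (q ≥ x - 1) | none => false)) = true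
                then none
                else findLoopB xs (some v) (some x) (c + 1))
             else findLoopB xs (some v) (some x) c) from rfl,
        show pairBad p2 (some v) x
          = ((x == v) && (x == 0 || (match p2 with | some q => decide (q ≥ x - 1) | none => false)))
          from rfl]
      by_cases hxv : (x == v) = true
      · rw [if_pos hxv, hxv, Bool.true_and]
        by_cases hb : (x == 0 || (match p2 with | some q => decide (q ≥ x - 1) | none => false)) = true
        · rw [if_pos hb, hb, Bool.true_or]
          rfl
        · rw [if_neg hb, ih, eq_false_of_ne_true hb, Bool.false_or,
            if_pos (congrArg some (beq_iff_eq.mp hxv).symm)]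
          split_ifs with h
          · rfl
          · simp only [Option.some.injEq]; omega
      · rw [if_neg hxv, ih, eq_false_of_ne_true hxv, Bool.false_and, Bool.false_or,
          if_neg (fun h => hxv (beq_iff_eq.mpr (Option.some.inj h).symm)), zero_add]

-- the 'bad pair' predicate in terms of counts/membership in the (sorted) whole list
def BadAt (v : List Int) (x : Int) : Prop :=
  2 ≤ v.count x ∧ (x = 0 ∨ 3 ≤ v.count x ∨ (x - 1) ∈ v)

theorem badScan_ctx (t : List Int) : ∀ (c b : Int), (c :: b :: t).Pairwise (· ≤ ·) →
    (badScan t (some c) (some b) = true ↔ ∃ x ∈ t, BadAt (c :: b :: t) x) := by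
  induction t with
  | nil => intro c b _; simp [badScan]
  | cons x xs ih =>
    intro c b hS
    have hcb : c ≤ b := (List.pairwise_cons.mp hS).1 b (by simp)
    have htail : (b :: x :: xs).Pairwise (· ≤ ·) := (List.pairwise_cons.mp hS).2
    have hbx : b ≤ x := (List.pairwise_cons.mp htail).1 x (by simp)
    have hxxs : ∀ y ∈ xs, x ≤ y := (List.pairwise_cons.mp (List.pairwise_cons.mp htail).2).1
    rw [show badScan (x :: xs) (some c) (some b)
        = (pairBad (some c) (some b) x || badScan xs (some b) (some x)) from rfl,
      Bool.or_eq_true, ih b x htail]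
    simp only [pairBad, Bool.and_eq_true, beq_iff_eq, Bool.or_eq_true, decide_eq_true_eq,
      BadAt, List.count_cons, List.mem_cons]
    constructor
    · rintro (⟨hxb, hrest⟩ | ⟨z, hz, h2, hcl⟩)
      · refine ⟨x, Or.inl rfl, ?_, ?_⟩
        · have e1 : (if x = x then 1 else 0) = 1 := by simp
          have e2 : (if b = x then 1 else 0) = 1 := by simp [hxb]
          omega
        · rcases hrest with h0 | hc
          · exact Or.inl h0
          · rcases (by omega : c = x - 1 ∨ c = x) with h | h
            · exact Or.inr (Or.inr (Or.inl h.symm))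
            · refine Or.inr (Or.inl ?_)
              have e1 : (if x = x then 1 else 0) = 1 := by simp
              have e2 : (if b = x then 1 else 0) = 1 := by simp [hxb]
              have e3 : (if c = x then 1 else 0) = 1 := by simp [h]
              omega
      · refine ⟨z, Or.inr hz, by omega, ?_⟩
        rcases hcl with h0 | h3 | hm
        · exact Or.inl h0
        · exact Or.inr (Or.inl (by omega))
        · exact Or.inr (Or.inr (by tauto))
    · rintro ⟨z, hzmem, h2, hcl⟩
      by_cases hzxs : z ∈ xs
      · right
        by_cases hzc : z = c
        · have hxz : x ≤ z := hxxs z hzxs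
          have hbz : b = z := by omega
          have hxz' : x = z := by omega
          have hc1 : xs.count z ≠ 0 := by
            rw [Ne, List.count_eq_zero]; exact fun h => h hzxs
          have e1 : (if x = z then 1 else 0) = 1 := by simp [hxz']
          have e2 : (if b = z then 1 else 0) = 1 := by simp [hbz]
          exact ⟨z, hzxs, by omega, Or.inr (Or.inl (by omega))⟩
        · have e3 : (if c = z then 1 else 0) = 0 := by rw [if_neg (fun h => hzc h.symm)]
          refine ⟨z, hzxs, by omega, ?_⟩
          rcases hcl with h0 | h3 | hm
          · exact Or.inl h0
          · exact Or.inr (Or.inl (by omega))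
          · rcases hm with hm | hm | hm | hm
            · by_cases hbz1 : z - 1 = b
              · exact Or.inr (Or.inr (Or.inl hbz1))
              · have hxz : x ≤ z := hxxs z hzxs
                have hbz : b = z := by omega
                have hxz' : x = z := by omega
                have hc1 : xs.count z ≠ 0 := by
                  rw [Ne, List.count_eq_zero]; exact fun h => h hzxs
                have e1 : (if x = z then 1 else 0) = 1 := by simp [hxz']
                have e2 : (if b = z then 1 else 0) = 1 := by simp [hbz]
                exact Or.inr (Or.inl (by omega))
            · exact Or.inr (Or.inr (Or.inl hm))
            · exact Or.inr (Or.inr (Or.inr (Or.inl hm)))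
            · exact Or.inr (Or.inr (Or.inr (Or.inr hm)))
      · have hzx : z = x := by
          rcases hzmem with h | h
          · exact h
          · exact absurd h hzxs
        subst hzx
        have hcx0 : xs.count z = 0 := List.count_eq_zero.mpr hzxs
        have e1 : (if z = z then 1 else 0) = 1 := by simp
        have hbz : z = b := by
          by_cases hzb : z = b
          · exact hzb
          · by_cases hzc : z = c
            · omega
            · have e2 : (if b = z then 1 else 0) = 0 := by rw [if_neg (fun h => hzb h.symm)]
              have e3 : (if c = z then 1 else 0) = 0 := by rw [if_neg (fun h => hzc h.symm)]
              omega
        left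
        refine ⟨hbz, ?_⟩
        rcases hcl with h0 | h3 | hm
        · exact Or.inl h0
        · right
          have e2 : (if b = z then 1 else 0) = 1 := by simp [hbz]
          by_cases hzc : z = c
          · omega
          · have e3 : (if c = z then 1 else 0) = 0 := by rw [if_neg (fun h => hzc h.symm)]
            omega
        · right
          rcases hm with hm | hm | hm | hm
          · omega
          · omega
          · omega
          · have := hxxs _ hm; omega

theorem badScan_one (t : List Int) : ∀ (b : Int), (b :: t).Pairwise (· ≤ ·) →
    (badScan t none (some b) = true ↔ ∃ x ∈ t, BadAt (b :: t) x) := by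
  cases t with
  | nil => intro b _; simp [badScan]
  | cons x xs =>
    intro b hS
    have hbx : b ≤ x := (List.pairwise_cons.mp hS).1 x (by simp)
    have htail : (x :: xs).Pairwise (· ≤ ·) := (List.pairwise_cons.mp hS).2
    have hxxs : ∀ y ∈ xs, x ≤ y := (List.pairwise_cons.mp htail).1
    rw [show badScan (x :: xs) none (some b)
        = (pairBad none (some b) x || badScan xs (some b) (some x)) from rfl,
      Bool.or_eq_true, badScan_ctx xs b x hS]
    simp only [pairBad, Bool.and_eq_true, beq_iff_eq, Bool.or_eq_true,
      BadAt, List.count_cons, List.mem_cons]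
    constructor
    · rintro (⟨hxb, hrest⟩ | ⟨z, hz, hbad⟩)
      · rcases hrest with h0 | hfalse
        · refine ⟨x, Or.inl rfl, ?_, Or.inl h0⟩
          have e1 : (if x = x then 1 else 0) = 1 := by simp
          have e2 : (if b = x then 1 else 0) = 1 := by simp [hxb]
          omega
        · exact absurd hfalse (by simp)
      · exact ⟨z, Or.inr hz, hbad⟩
    · rintro ⟨z, hzmem, h2, hcl⟩
      by_cases hzxs : z ∈ xs
      · exact Or.inr ⟨z, hzxs, h2, hcl⟩
      · have hzx : z = x := by
          rcases hzmem with h | h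
          · exact h
          · exact absurd h hzxs
        subst hzx
        have hcx0 : xs.count z = 0 := List.count_eq_zero.mpr hzxs
        have e1 : (if z = z then 1 else 0) = 1 := by simp
        have hbz : z = b := by
          by_cases hzb : z = b
          · exact hzb
          · have e2 : (if b = z then 1 else 0) = 0 := by rw [if_neg (fun h => hzb h.symm)]
            omega
        left
        refine ⟨hbz, Or.inl ?_⟩
        have e2 : (if b = z then 1 else 0) = 1 := by simp [hbz]
        rcases hcl with h0 | h3 | hm
        · exact h0
        · omega
        · rcases hm with hm | hm | hm
          · omega
          · omega
          · have := hxxs _ hm; omega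

theorem badScan_top (l : List Int) (hS : l.Pairwise (· ≤ ·)) :
    (badScan l none none = true ↔ ∃ x ∈ l, BadAt l x) := by
  cases l with
  | nil => simp [badScan]
  | cons b t =>
    rw [show badScan (b :: t) none none = (pairBad none none b || badScan t none (some b)) from rfl,
      Bool.or_eq_true, badScan_one t b hS]
    constructor
    · rintro (h | ⟨z, hz, hbad⟩)
      · exact absurd h (by simp [pairBad])
      · exact ⟨z, List.mem_cons_of_mem b hz, hbad⟩
    · rintro ⟨z, hzmem, h2, hcl⟩
      by_cases hzt : z ∈ t
      · exact Or.inr ⟨z, hzt, h2, hcl⟩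
      · have hzb : z = b := by
          rcases List.mem_cons.mp hzmem with h | h
          · exact h
          · exact absurd h hzt
        exfalso
        simp only [List.count_cons, beq_iff_eq] at h2
        have e : (if b = z then 1 else 0) = 1 := by simp [hzb]
        have hcx0 : t.count z = 0 := List.count_eq_zero.mpr hzt
        omega

-- pair counter on a sorted list = length - number of distinct values
theorem cntAdj_ctx (t : List Int) : ∀ (b : Int), (b :: t).Pairwise (· ≤ ·) →
    cntAdj t (some b) = ((b :: t).length : Int) - (b :: t).dedup.length := by
  induction t with
  | nil => intro b _; simp [cntAdj]
  | cons x xs ih =>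
    intro b hS
    have hbx : b ≤ x := (List.pairwise_cons.mp hS).1 x (by simp)
    have htail : (x :: xs).Pairwise (· ≤ ·) := (List.pairwise_cons.mp hS).2
    have hxxs : ∀ y ∈ xs, x ≤ y := (List.pairwise_cons.mp htail).1
    have hmem : b ∈ x :: xs ↔ b = x := by
      simp only [List.mem_cons]
      constructor
      · rintro (h | h)
        · exact h
        · have := hxxs _ h; omega
      · exact fun h => Or.inl h
    rw [show cntAdj (x :: xs) (some b)
        = ((if (some b : Option Int) = some x then 1 else 0) + cntAdj xs (some x)) from rfl,
      ih x htail]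
    by_cases hbx' : b = x
    · rw [List.dedup_cons_of_mem (hmem.mpr hbx'), if_pos (by rw [hbx'])]
      simp only [List.length_cons]
      push_cast
      ring
    · rw [List.dedup_cons_of_notMem (fun h => hbx' (hmem.mp h)),
        if_neg (by simp [hbx'])]
      simp only [List.length_cons]
      push_cast
      ring

theorem cntAdj_top (l : List Int) (hS : l.Pairwise (· ≤ ·)) :
    cntAdj l none = (l.length : Int) - l.dedup.length := by
  cases l with
  | nil => simp [cntAdj]
  | cons b t =>
    rw [show cntAdj (b :: t) none
        = ((if (none : Option Int) = some b then 1 else 0) + cntAdj t (some b)) from rfl,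
      cntAdj_ctx t b hS]
    simp

-- auxiliary sums from the A-side (parity)
theorem range_sum_int (n : Nat) :
    2 * ((List.range n).map (fun k : Nat => (k : Int))).sum = (n : Int) * ((n : Int) - 1) := by
  induction n with
  | zero => simp
  | succ m ih =>
    rw [List.range_succ, List.map_append, List.sum_append]
    simp only [List.map_cons, List.map_nil, List.sum_cons, List.sum_nil]
    push_cast
    push_cast at ih
    linear_combination ih

theorem sum_map_sub_int {α : Type} (l : List α) (f g : α → Int) :
    (l.map (fun x => f x - g x)).sum = (l.map f).sum - (l.map g).sum := by
  induction l with
  | nil => simp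
  | cons x xs ih => simp [ih]; ring

theorem temp_eq (xs : List Int) :
    (PySem.List.pyRange 0 (xs.length : Int) 1).foldl (fun t i => t + (PySem.List.pyGetD xs i 0 - i)) 0
      = xs.sum - ((List.range xs.length).map (fun k : Nat => (k : Int))).sum := by
  rw [PySem.List.foldl_add, sum_map_sub_int]
  have h1 : (PySem.List.pyRange 0 (xs.length : Int) 1).map (fun i => PySem.List.pyGetD xs i 0) = xs := by
    simpa [PySem.List.len] using PySem.List.map_pyGetD_pyRange_zero xs 0
  have h2 : (PySem.List.pyRange 0 (xs.length : Int) 1).map (fun i : Int => i)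
      = (List.range xs.length).map (fun k : Nat => (k : Int)) := by
    simpa [List.map_map] using congrArg (List.map (fun i : Int => i)) (PySem.List.pyRange_zero_natCast xs.length)
  rw [h1, h2]
  ring

-- counts ≤ 2: length - #distinct = #values with count exactly 2
theorem count_sum_split (d : List Int) (c : Int → Nat) (h : ∀ x ∈ d, 1 ≤ c x ∧ c x ≤ 2) :
    (d.map c).sum = d.length + (d.filter (fun x => c x == 2)).length := by
  induction d with
  | nil => simp
  | cons x xs ih =>
    have hx := h x (by simp)
    have ih' := ih (fun y hy => h y (by simp [hy]))
    simp only [List.map_cons, List.sum_cons, List.length_cons, List.filter_cons]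
    by_cases h2 : c x = 2
    · simp [h2, ih']; omega
    · have : (c x == 2) = false := by simp [h2]
      rw [this]; simp at ih' ⊢; omega

theorem find_main (A : List Int) : find A = find_alt A := by
  simp only [find, find_alt]
  set As := PySem.List.sorted A (fun x : Int => x) false with hAs
  have hS : As.Pairwise (· ≤ ·) := by
    simpa using PySem.List.sorted_pairwise A (fun x : Int => x)
  have hdic : (PySem.List.pyRange 0 (As.length : Int) 1).foldl
      (fun d i => d.modify (PySem.List.pyGetD As i 0) 0 (· + 1)) PySem.Dict.empty
      = PySem.Dict.counter As := by
    have h := PySem.List.foldl_pyRange_pyGetD As 0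
      (fun (d : PySem.Dict Int Int) (x : Int) => d.modify x 0 (· + 1)) PySem.Dict.empty (a := 0) le_rfl
    simp only [PySem.List.len, Int.toNat_zero, List.drop_zero] at h
    rw [h, ← PySem.Dict.counter_eq_foldl]
  rw [hdic, loopA_eq, loopB_eq]
  simp only [PySem.Dict.getD_counter, PySem.Dict.contains_counter, temp_eq]
  rw [show PySem.Set.empty = ([] : List Int) from rfl, ← PySem.Set.ofList_eq_foldl]
  set S := PySem.Set.ofList (As.filter (fun x => ((As.count x : Int)) == 2)) with hSdef
  have hpar : (PySem.Int.mod (As.sum - ((List.range As.length).map (fun k : Nat => (k : Int))).sum) 2 == 1)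
      = (PySem.Int.mod (As.sum - PySem.Int.floordiv ((As.length : Int) * ((As.length : Int) - 1)) 2) 2 == 1) := by
    congr 2
    have h2 := range_sum_int As.length
    rw [PySem.Int.floordiv_eq_ediv_of_pos (by norm_num : (0:Int) < 2)]
    omega
  by_cases hP : ∃ x ∈ As, BadAt As x
  · rw [if_pos ((badScan_top As hS).mpr hP)]
    by_cases hQ : (As.any fun x => decide (2 < ((As.count x : Int))) || (((As.count x : Int)) == 2 && As.contains (x - 1))) = true
    · rw [if_pos hQ]
    · rw [if_neg hQ]
      show (if PySem.Set.len S > 1 then "cslnb"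
            else if PySem.Set.contains S 0 = true then "cslnb"
            else if (PySem.Int.mod (As.sum - ((List.range As.length).map (fun k : Nat => (k : Int))).sum) 2 == 1) = true
              then "sjfnb" else "cslnb") = "cslnb"
      obtain ⟨x, hx, hBA⟩ := hP
      have h2 : 2 ≤ As.count x := hBA.1
      have hcl : x = 0 ∨ 3 ≤ As.count x ∨ (x - 1) ∈ As := hBA.2
      have hQ' : ∀ y ∈ As, As.count y ≤ 2 ∧ ¬(As.count y = 2 ∧ (y - 1) ∈ As) := by
        intro y hy
        refine ⟨?_, ?_⟩
        · by_contra h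
          refine hQ (List.any_eq_true.mpr ⟨y, hy, ?_⟩)
          simp only [Bool.or_eq_true, decide_eq_true_eq, Bool.and_eq_true, beq_iff_eq]
          exact Or.inl (by exact_mod_cast (show 2 < As.count y by omega))
        · rintro ⟨hc, hm⟩
          refine hQ (List.any_eq_true.mpr ⟨y, hy, ?_⟩)
          simp only [Bool.or_eq_true, decide_eq_true_eq, Bool.and_eq_true, beq_iff_eq]
          exact Or.inr ⟨by exact_mod_cast hc, by simpa using hm⟩
      have hx2 : As.count x = 2 := by
        have := (hQ' x hx).1; omega
      have hx0 : x = 0 := by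
        rcases hcl with h | h | h
        · exact h
        · omega
        · exact absurd ⟨hx2, h⟩ (hQ' x hx).2
      have h0mem : (0 : Int) ∈ S := by
        rw [hSdef, PySem.Set.mem_ofList, List.mem_filter]
        exact ⟨hx0 ▸ hx, by simp [hx0 ▸ hx2]⟩
      have h0c : PySem.Set.contains S 0 = true := by
        simpa [PySem.Set.contains, List.contains_iff_mem] using h0mem
      by_cases hlen : PySem.Set.len S > 1
      · rw [if_pos hlen]
      · rw [if_neg hlen, if_pos h0c]
  · have hb : badScan As none none = false :=
      eq_false_of_ne_true (fun h => hP ((badScan_top As hS).mp h))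
    rw [if_neg (show ¬(badScan As none none = true) from by rw [hb]; exact Bool.false_ne_true)]
    have hle : ∀ y ∈ As, As.count y ≤ 2 := by
      intro y hy
      by_contra h
      refine hP ⟨y, hy, ?_⟩
      unfold BadAt
      exact ⟨by omega, Or.inr (Or.inl (by omega))⟩
    have hge : ∀ y ∈ As, 1 ≤ As.count y := by
      intro y hy
      have : As.count y ≠ 0 := by rw [Ne, List.count_eq_zero]; exact fun h => h hy
      omega
    have hQ : (As.any fun x => decide (2 < ((As.count x : Int))) || (((As.count x : Int)) == 2 && As.contains (x - 1))) = false := by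
      apply eq_false_of_ne_true
      intro h
      obtain ⟨y, hy, hcase⟩ := List.any_eq_true.mp h
      simp only [Bool.or_eq_true, decide_eq_true_eq, Bool.and_eq_true, beq_iff_eq,
        List.contains_iff_mem] at hcase
      rcases hcase with h' | ⟨hc, hm⟩
      · have h2 : (As.count y : Int) ≤ 2 := by exact_mod_cast hle y hy
        omega
      · have hc' : As.count y = 2 := by exact_mod_cast hc
        refine hP ⟨y, hy, ?_⟩
        unfold BadAt
        exact ⟨by omega, Or.inr (Or.inr hm)⟩
    rw [if_neg (show ¬((As.any fun x => decide (2 < ((As.count x : Int))) || (((As.count x : Int)) == 2 && As.contains (x - 1))) = true) from by rw [hQ]; exact Bool.false_ne_true)]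
    show (if PySem.Set.len S > 1 then "cslnb"
          else if PySem.Set.contains S 0 = true then "cslnb"
          else if (PySem.Int.mod (As.sum - ((List.range As.length).map (fun k : Nat => (k : Int))).sum) 2 == 1) = true
            then "sjfnb" else "cslnb")
        = (if 0 + cntAdj As none > 1 then "cslnb"
          else if (PySem.Int.mod (As.sum - PySem.Int.floordiv ((As.length : Int) * ((As.length : Int) - 1)) 2) 2 == 1) = true
            then "sjfnb" else "cslnb")
    have h0c : PySem.Set.contains S 0 = false := by
      apply eq_false_of_ne_true
      intro h
      have h' := h
      rw [hSdef] at h'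
      simp only [PySem.Set.contains, List.contains_iff_mem, PySem.Set.mem_ofList,
        List.mem_filter, beq_iff_eq] at h'
      have hm0 : (0 : Int) ∈ As := h'.1
      have hc0 : As.count 0 = 2 := by exact_mod_cast h'.2
      refine hP ⟨0, hm0, ?_⟩
      unfold BadAt
      exact ⟨by omega, Or.inl rfl⟩
    have hperm : S.Perm (As.dedup.filter (fun y => As.count y == 2)) := by
      rw [hSdef, List.perm_ext_iff_of_nodup (PySem.Set.nodup_ofList _) (List.Nodup.filter _ As.nodup_dedup)]
      intro y
      rw [PySem.Set.mem_ofList, List.mem_filter, List.mem_filter, List.mem_dedup]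
      constructor
      · rintro ⟨hy, hc⟩
        exact ⟨hy, by simp at hc ⊢; exact_mod_cast hc⟩
      · rintro ⟨hy, hc⟩
        exact ⟨hy, by simp at hc ⊢; exact_mod_cast hc⟩
    have hsum : (As.dedup.map (fun y => As.count y)).sum = As.length :=
      List.sum_map_count_dedup_eq_length As
    have hcnt2 : (As.dedup.map (fun y => As.count y)).sum
        = As.dedup.length + (As.dedup.filter (fun y => As.count y == 2)).length := by
      apply count_sum_split
      intro y hy
      have hy' : y ∈ As := List.mem_dedup.mp hy
      exact ⟨hge y hy', hle y hy'⟩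
    have hpairs : (0 : Int) + cntAdj As none
        = ((As.dedup.filter (fun y => As.count y == 2)).length : Int) := by
      rw [cntAdj_top As hS]
      omega
    have hlen : PySem.Set.len S = ((As.dedup.filter (fun y => As.count y == 2)).length : Int) := by
      simp [PySem.Set.len, hperm.length_eq]
    rw [hpairs, hlen, hpar]
    by_cases hk : ((As.dedup.filter (fun y => As.count y == 2)).length : Int) > 1
    · rw [if_pos hk, if_pos hk]
    · rw [if_neg hk, if_neg hk,
        if_neg (show ¬(PySem.Set.contains S 0 = true) from by rw [h0c]; exact Bool.false_ne_true)]

-- ===== VERDICT (by name: the statement is the Claim_ definition above) =====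
theorem find_spec : Claim_equal_find := by
  intro A _
  exact find_main A
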